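-- pv_equiv track=rewrite | github.com/ScienceAdvances/scripts | eCLIP-seq/src/peka.py | pos_count_kmer
-- ===== SOURCE A (Python) =====
-- from itertools import combinations, product
--
-- def pos_count_kmer(seqs, k_length, window, repeats, kmer_list=False):
--     """Get number of occurences of each kmer for each position.
--
--     Alternativly, if kmer_list is defined, it returns positional counts
--     only for kmers in the list.
--     """
--     shift = int((k_length + 1) / 2)
--     zero_counts = {pos: 0 for pos in range(-window + shift, window + shift + 1)}
--     if kmer_list:
--         possible_kmers = kmer_list
--     else:
--         possible_kmers = []
--         if repeats != "repeats_only":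
--             for i in product("ACGT", repeat=k_length):
--                 possible_kmers.append("".join(i))
--         if repeats == "repeats_only" or repeats == "masked":
--             for i in product("acgt", repeat=k_length):
--                 possible_kmers.append("".join(i))
--     kmer_pos_count = {x: zero_counts.copy() for x in possible_kmers}
--     for sequence in seqs:
--         for i in range(k_length, len(sequence) - k_length + 1):
--             kmer = sequence[i : i + k_length]
--             relative_pos = i - window - k_length + shift - 1
--             try:
--                 kmer_pos_count[kmer][relative_pos] += 1
--             except KeyError:
--                 pass
--     return kmer_pos_count
-- ===== SOURCE B (Python) =====
-- from itertools import product
--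
--
-- def pos_count_kmer(seqs, k_length, window, repeats, kmer_list=False):
--     """Get number of occurences of each kmer for each position.
--
--     Re-implementation: flatten all (kmer, relative_pos) occurrences into one
--     list, tally them into a flat dict, group the tally per kmer, and build
--     each output row by merging the per-kmer tally over a shared zero row
--     (no prefilled table mutated per occurrence, no try/except).
--     """
--     shift = int((k_length + 1) / 2)
--     positions = list(range(-window + shift, window + shift + 1))
--     if kmer_list:
--         possible_kmers = kmer_list
--     else:
--         alphabets = []
--         if repeats != "repeats_only":
--             alphabets.append("ACGT")
--         if repeats == "repeats_only" or repeats == "masked":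
--             alphabets.append("acgt")
--         possible_kmers = ["".join(t) for a in alphabets
--                           for t in product(a, repeat=k_length)]
--     pairs = [(seq[i:i + k_length], i - window - k_length + shift - 1)
--              for seq in seqs for i in range(k_length, len(seq) - k_length + 1)]
--     occ = {}
--     for key in pairs:
--         occ[key] = occ.get(key, 0) + 1
--     grouped = {}
--     for (km, p), c in occ.items():
--         grouped.setdefault(km, {})[p] = c
--     zeros = dict.fromkeys(positions, 0)
--     return {km: {**zeros,
--                  **{p: c for p, c in grouped.get(km, {}).items() if p in zeros}}
--             for km in possible_kmers}
-- ===== Notes on version B (the rewrite author's own statement) =====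
-- stated objective: alternative
-- what changed: B replaces A's per-occurrence mutation of a prefilled dict-of-dicts under try/except KeyError with staged passes: flatten all (kmer, relative_pos) occurrences into one list, tally them into a flat dict, group the tally per kmer, and build each output row by dict-merging the (position-filtered) per-kmer tally over a shared zero row.
import Mathlib
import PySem

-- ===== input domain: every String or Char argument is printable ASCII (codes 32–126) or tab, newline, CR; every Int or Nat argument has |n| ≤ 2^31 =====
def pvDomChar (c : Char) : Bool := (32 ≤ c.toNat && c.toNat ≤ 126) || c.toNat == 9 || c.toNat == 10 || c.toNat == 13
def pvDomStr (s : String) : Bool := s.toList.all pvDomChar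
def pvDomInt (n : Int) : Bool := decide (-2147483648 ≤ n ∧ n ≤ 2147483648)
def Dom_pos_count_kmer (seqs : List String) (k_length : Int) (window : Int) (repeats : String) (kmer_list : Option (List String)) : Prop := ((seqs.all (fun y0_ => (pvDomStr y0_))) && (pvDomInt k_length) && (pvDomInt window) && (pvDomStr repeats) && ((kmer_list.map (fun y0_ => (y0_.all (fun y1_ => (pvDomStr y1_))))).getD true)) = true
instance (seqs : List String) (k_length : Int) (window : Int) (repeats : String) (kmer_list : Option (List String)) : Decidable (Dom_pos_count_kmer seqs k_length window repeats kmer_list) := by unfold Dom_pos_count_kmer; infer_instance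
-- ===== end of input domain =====

-- B flattens all (kmer, relative_pos) occurrences into one list, tallies them into a
-- flat dict, groups the tally per kmer, and builds each output row by merging the
-- per-kmer tally over a shared zero row, instead of A's prefilled zero table mutated
-- per occurrence under try/except (objective: alternative decomposition).

-- ===== PORT A =====
-- itertools.product(alpha, repeat=n), each tuple joined to a string
def pvKmerProd (alpha : List Char) : Nat → List (List Char)
  | 0 => [[]]
  | n + 1 => alpha.flatMap (fun c => (pvKmerProd alpha n).map (fun t => c :: t))

-- A's `if kmer_list: …` block (kmer_list falsy = None or [])
def pvPossibleKmers (k_length : Int) (repeats : String) (kmer_list : Option (List String)) : List String :=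
  match kmer_list with
  | some (x :: xs) => x :: xs
  | _ =>
      (if repeats ≠ "repeats_only" then (pvKmerProd "ACGT".toList k_length.toNat).map (fun cs => String.ofList cs) else [])
      ++ (if repeats = "repeats_only" ∨ repeats = "masked" then (pvKmerProd "acgt".toList k_length.toNat).map (fun cs => String.ofList cs) else [])

-- the body of A's try/except: kmer_pos_count[kmer][relative_pos] += 1, KeyError dropped
def pvBump (d : PySem.Dict String (PySem.Dict Int Int)) (kmer : String) (rp : Int) : PySem.Dict String (PySem.Dict Int Int) :=
  match d.get? kmer with
  | none => d
  | some inner =>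
    match inner.get? rp with
    | none => d
    | some v => d.insert kmer (inner.insert rp (v + 1))

def pos_count_kmer (seqs : List String) (k_length : Int) (window : Int) (repeats : String) (kmer_list : Option (List String)) : List (String × List (Int × Int)) :=
  let shift : Int := PySem.Int.truncdiv (k_length + 1) 2
  let zero_counts : PySem.Dict Int Int :=
    (PySem.List.pyRange (-window + shift) (window + shift + 1) 1).foldl
      (fun d pos => d.insert pos 0) PySem.Dict.empty
  let possible_kmers := pvPossibleKmers k_length repeats kmer_list
  let kmer_pos_count : PySem.Dict String (PySem.Dict Int Int) :=
    possible_kmers.foldl (fun d x => d.insert x zero_counts) PySem.Dict.empty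
  let final :=
    seqs.foldl (fun d sequence =>
      (PySem.List.pyRange k_length (PySem.Str.len sequence - k_length + 1) 1).foldl (fun d i =>
        let kmer := PySem.Str.slice sequence (some i) (some (i + k_length))
        let relative_pos := i - window - k_length + shift - 1
        pvBump d kmer relative_pos) d) kmer_pos_count
  final.items.map (fun q => (q.1, q.2.items))

-- ===== PORT B =====
-- B's kmer construction: a list of alphabets, one flat comprehension over it
def pvAltKmers (k_length : Int) (repeats : String) (kmer_list : Option (List String)) : List String :=
  if kmer_list.getD [] ≠ [] then kmer_list.getD []
  else
    let alphabets : List String :=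
      (if repeats ≠ "repeats_only" then ["ACGT"] else [])
      ++ (if repeats = "repeats_only" ∨ repeats = "masked" then ["acgt"] else [])
    alphabets.flatMap (fun a => (pvKmerProd a.toList k_length.toNat).map (fun cs => String.ofList cs))

def pos_count_kmer_alt (seqs : List String) (k_length : Int) (window : Int) (repeats : String) (kmer_list : Option (List String)) : List (String × List (Int × Int)) :=
  let shift : Int := PySem.Int.truncdiv (k_length + 1) 2
  let positions := PySem.List.pyRange (-window + shift) (window + shift + 1) 1
  let possible_kmers := pvAltKmers k_length repeats kmer_list
  let pairs : List (String × Int) :=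
    seqs.flatMap (fun seq =>
      (PySem.List.pyRange k_length (PySem.Str.len seq - k_length + 1) 1).map
        (fun i => (PySem.Str.slice seq (some i) (some (i + k_length)), i - window - k_length + shift - 1)))
  let occ : PySem.Dict (String × Int) Int :=
    pairs.foldl (fun d key => d.insert key (d.getD key 0 + 1)) PySem.Dict.empty
  let grouped : PySem.Dict String (PySem.Dict Int Int) :=
    occ.items.foldl (fun g e =>
      g.insert e.1.1 ((g.getD e.1.1 PySem.Dict.empty).insert e.1.2 e.2)) PySem.Dict.empty
  let zeros : PySem.Dict Int Int := positions.foldl (fun d p => d.insert p 0) PySem.Dict.empty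
  let res : PySem.Dict String (PySem.Dict Int Int) :=
    possible_kmers.foldl (fun d km =>
        d.insert km (((grouped.getD km PySem.Dict.empty).items.filter
            (fun e => zeros.contains e.1)).foldl (fun r e => r.insert e.1 e.2) zeros))
      PySem.Dict.empty
  res.items.map (fun q => (q.1, q.2.items))

-- ===== PRECONDITION & SPEC =====
-- Pre_ excludes only the inputs where Python A raises: a negative k_length with a
-- falsy kmer_list reaches product("ACGT", repeat=k_length), a ValueError.
def Pre_pos_count_kmer (seqs : List String) (k_length : Int) (window : Int) (repeats : String) (kmer_list : Option (List String)) : Prop :=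
  0 ≤ k_length ∨ kmer_list.getD [] ≠ []
instance (seqs : List String) (k_length : Int) (window : Int) (repeats : String) (kmer_list : Option (List String)) : Decidable (Pre_pos_count_kmer seqs k_length window repeats kmer_list) := by unfold Pre_pos_count_kmer; infer_instance

def pvWitness_pos_count_kmer : List String × Int × Int × String × Option (List String) :=
  (["ACGTACG"], 1, 2, "", none)

def Spec_pos_count_kmer (seqs : List String) (k_length : Int) (window : Int) (repeats : String) (kmer_list : Option (List String)) (out : List (String × List (Int × Int))) : Prop := out = pos_count_kmer_alt seqs k_length window repeats kmer_list
instance (seqs : List String) (k_length : Int) (window : Int) (repeats : String) (kmer_list : Option (List String)) (out : List (String × List (Int × Int))) : Decidable (Spec_pos_count_kmer seqs k_length window repeats kmer_list out) := by unfold Spec_pos_count_kmer; infer_instance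

-- ===== CLAIM (what is proved, stated in full; the proofs are below) =====
def Claim_equal_pos_count_kmer : Prop := ∀ (seqs : List String) (k_length : Int) (window : Int) (repeats : String) (kmer_list : Option (List String)), Dom_pos_count_kmer seqs k_length window repeats kmer_list → Pre_pos_count_kmer seqs k_length window repeats kmer_list → Spec_pos_count_kmer seqs k_length window repeats kmer_list (pos_count_kmer seqs k_length window repeats kmer_list)

-- ===== LEMMAS AND PROOFS =====

-- both kmer constructions produce the same list
theorem pvAltKmers_eq (k_length : Int) (repeats : String) (kmer_list : Option (List String)) :
    pvAltKmers k_length repeats kmer_list = pvPossibleKmers k_length repeats kmer_list := by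
  unfold pvAltKmers pvPossibleKmers
  match kmer_list with
  | some (x :: xs) => simp
  | some [] =>
      simp only [Option.getD_some, ne_eq, not_true_eq_false, if_false]
      by_cases hr : repeats = "repeats_only" <;> by_cases hm : repeats = "masked" <;> simp [hr, hm]
  | none =>
      simp only [Option.getD_none, ne_eq, not_true_eq_false, if_false]
      by_cases hr : repeats = "repeats_only" <;> by_cases hm : repeats = "masked" <;> simp [hr, hm]

-- nested loop over seqs/positions = one fold over the flattened occurrence list
theorem pv_foldl_foldl_flatMap {α β σ : Type} (g : α → List β) (f : σ → β → σ) :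
    ∀ (xs : List α) (init : σ),
      xs.foldl (fun a x => (g x).foldl f a) init = (xs.flatMap g).foldl f init := by
  intro xs
  induction xs with
  | nil => intro init; rfl
  | cons x xs ih => intro init; simp [List.flatMap_cons, List.foldl_append, ih]

-- a fold of inserts whose value depends only on the key: lookup
theorem pv_get?_foldl_insert_fn {κ ν : Type} [BEq κ] [LawfulBEq κ] [DecidableEq κ]
    (f : κ → ν) : ∀ (l : List κ) (d : PySem.Dict κ ν) (k : κ),
      (l.foldl (fun d x => d.insert x (f x)) d).get? k
        = if k ∈ l then some (f k) else d.get? k := by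
  intro l
  induction l with
  | nil => intro d k; simp
  | cons x xs ih =>
    intro d k
    simp only [List.foldl_cons, ih, PySem.Dict.get?_insert, List.mem_cons]
    by_cases hx : k ∈ xs <;> by_cases he : k = x <;> simp [hx, he]

-- a fold of inserts whose value depends only on the key, from empty: the items
theorem pv_items_foldl_insert_fn {κ ν : Type} [BEq κ] [LawfulBEq κ] [DecidableEq κ]
    (f : κ → ν) (l : List κ) :
    (l.foldl (fun d x => d.insert x (f x)) (PySem.Dict.empty : PySem.Dict κ ν)).items
      = (PySem.Set.ofList l).map (fun k => (k, f k)) := by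
  cases l with
  | nil => rfl
  | cons x xs =>
    set l := x :: xs with hl
    set d := l.foldl (fun d x => d.insert x (f x)) (PySem.Dict.empty : PySem.Dict κ ν) with hd
    have hkeys : d.keys = PySem.Set.ofList l := by
      rw [hd, PySem.Dict.keys_foldl_insert l (fun _ x => f x)]
      simp [PySem.Set.update, PySem.Set.ofList_eq_foldl, PySem.Dict.keys_empty]
    have hnd : d.keys.Nodup := by
      rw [hkeys]; exact PySem.Set.nodup_ofList l
    rw [PySem.Dict.items_eq_map_keys d hnd (f x), hkeys]
    apply List.map_congr_left
    intro k hk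
    have hkl : k ∈ l := (PySem.Set.mem_ofList l k).mp hk
    have : d.get? k = some (f k) := by
      rw [hd, pv_get?_foldl_insert_fn f l PySem.Dict.empty k, if_pos hkl]
    rw [PySem.Dict.getD_of_get?_eq_some _ _ this]

-- the table with key lists K (kmers) and P (positions) and entries g km p
def pvTable (K : List String) (P : List Int) (g : String → Int → Int) : PySem.Dict String (PySem.Dict Int Int) :=
  PySem.Dict.mk (K.map (fun km => (km, PySem.Dict.mk (P.map (fun p => (p, g km p))))))

theorem pvTable_congr (K : List String) (P : List Int) (g g' : String → Int → Int)
    (h : ∀ km ∈ K, ∀ p ∈ P, g km p = g' km p) : pvTable K P g = pvTable K P g' := by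
  unfold pvTable
  congr 1
  apply List.map_congr_left
  intro km hkm
  congr 1
  congr 1
  apply List.map_congr_left
  intro p hp
  rw [h km hkm p hp]

theorem pvTable_keys (K : List String) (P : List Int) (g : String → Int → Int) :
    (pvTable K P g).keys = K := by
  simp [pvTable, PySem.Dict.keys, Function.comp_def]

theorem pvTable_get? (K : List String) (P : List Int) (g : String → Int → Int)
    (hK : K.Nodup) (km : String) (h : km ∈ K) :
    (pvTable K P g).get? km = some (PySem.Dict.mk (P.map (fun p => (p, g km p)))) := by
  apply PySem.Dict.get?_of_mem_items
  · exact List.mem_map.mpr ⟨km, h, rfl⟩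
  · rw [pvTable_keys]; exact hK

theorem pv_mk_get? (P : List Int) (h : String → Int → Int) (km : String)
    (hP : P.Nodup) (p : Int) (hp : p ∈ P) :
    (PySem.Dict.mk (P.map (fun q => (q, h km q)))).get? p = some (h km p) := by
  apply PySem.Dict.get?_of_mem_items
  · exact List.mem_map.mpr ⟨p, hp, rfl⟩
  · simpa [PySem.Dict.keys, Function.comp_def] using hP

-- keyed sum over an association list: what A's occurrence loop adds at one cell
def pvKeySum (L : List ((String × Int) × Int)) (q0 : String × Int) : Int :=
  ((L.filter (fun e => e.1 == q0)).map (fun e => e.2)).sum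

theorem pvKeySum_nil (q0 : String × Int) : pvKeySum [] q0 = 0 := rfl

theorem pvKeySum_cons (a : String) (b c : Int) (L : List ((String × Int) × Int)) (q0 : String × Int) :
    pvKeySum (((a, b), c) :: L) q0 = (if ((a, b) == q0) = true then c else 0) + pvKeySum L q0 := by
  unfold pvKeySum
  rw [List.filter_cons]
  by_cases h : ((a, b) == q0) = true <;> simp [h]

-- one guarded add step on a table (proof helper: pvBump with an arbitrary increment)
def pvAdd (d : PySem.Dict String (PySem.Dict Int Int)) (kmer : String) (rp : Int) (c : Int) : PySem.Dict String (PySem.Dict Int Int) :=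
  match d.get? kmer with
  | none => d
  | some row =>
    match row.get? rp with
    | none => d
    | some v => d.insert kmer (row.insert rp (v + c))

theorem pvAdd_table (K : List String) (P : List Int) (hK : K.Nodup) (hP : P.Nodup)
    (g : String → Int → Int) (km0 : String) (p0 c : Int) :
    pvAdd (pvTable K P g) km0 p0 c
      = if km0 ∈ K ∧ p0 ∈ P then
          pvTable K P (fun km p => if km = km0 ∧ p = p0 then g km p + c else g km p)
        else pvTable K P g := by
  by_cases hkm : km0 ∈ K
  · have hget := pvTable_get? K P g hK km0 hkm
    by_cases hp : p0 ∈ P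
    · have hget2 := pv_mk_get? P g km0 hP p0 hp
      have hcont : (pvTable K P g).contains km0 = true := by
        rw [PySem.Dict.contains_iff_mem_keys, pvTable_keys]; exact hkm
      have hcont2 : (PySem.Dict.mk (P.map (fun q => (q, g km0 q)))).contains p0 = true := by
        rw [PySem.Dict.contains_iff_mem_keys]
        simpa [PySem.Dict.keys, Function.comp_def] using hp
      rw [if_pos ⟨hkm, hp⟩]
      simp only [pvAdd, hget, hget2]
      apply PySem.Dict.ext
      rw [PySem.Dict.items_insert_of_contains _ _ hcont]
      unfold pvTable
      simp only [List.map_map]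
      apply List.map_congr_left
      intro km hkmK
      by_cases he : km = km0
      · subst he
        simp only [Function.comp_apply, beq_self_eq_true, if_true]
        congr 1
        apply PySem.Dict.ext
        rw [PySem.Dict.items_insert_of_contains _ _ hcont2]
        simp only [List.map_map]
        apply List.map_congr_left
        intro p hpP
        by_cases hpe : p = p0
        · subst hpe; simp
        · simp [hpe]
      · simp only [Function.comp_apply]
        rw [if_neg (by simp [he])]
        have : ∀ p, (if km = km0 ∧ p = p0 then g km p + c else g km p) = g km p := by
          intro p; rw [if_neg (by simp [he])]
        simp only [this]
    · rw [if_neg (by simp [hp])]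
      have hnone : (PySem.Dict.mk (P.map (fun q => (q, g km0 q)))).get? p0 = none := by
        rw [PySem.Dict.get?_eq_none_iff_not_mem_keys]
        simpa [PySem.Dict.keys, Function.comp_def] using hp
      simp only [pvAdd, hget, hnone]
  · rw [if_neg (by simp [hkm])]
    have hnone : (pvTable K P g).get? km0 = none := by
      rw [PySem.Dict.get?_eq_none_iff_not_mem_keys, pvTable_keys]; exact hkm
    simp only [pvAdd, hnone]

-- a full guarded fill pass over a table adds the keyed sums
theorem pvAdd_fold (K : List String) (P : List Int) (hK : K.Nodup) (hP : P.Nodup) :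
    ∀ (L : List ((String × Int) × Int)) (g : String → Int → Int),
      L.foldl (fun d e => pvAdd d e.1.1 e.1.2 e.2) (pvTable K P g)
        = pvTable K P (fun km p => g km p + pvKeySum L (km, p)) := by
  intro L
  induction L with
  | nil => intro g; simp [pvKeySum_nil]
  | cons e rest ih =>
    intro g
    obtain ⟨⟨a, b⟩, c⟩ := e
    simp only [List.foldl_cons]
    rw [pvAdd_table K P hK hP g a b c]
    by_cases hab : a ∈ K ∧ b ∈ P
    · rw [if_pos hab, ih]
      apply pvTable_congr
      intro km hkm p hp
      rw [pvKeySum_cons]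
      by_cases he : km = a ∧ p = b
      · obtain ⟨h1, h2⟩ := he; subst h1; subst h2
        rw [if_pos (And.intro rfl rfl)]
        simp only [beq_self_eq_true, if_true]
        ring
      · have hbeq : ((a, b) == (km, p)) = false := by
          simp only [beq_eq_false_iff_ne, ne_eq, Prod.mk.injEq, not_and]
          intro h1 h2
          exact he ⟨h1.symm, h2.symm⟩
        rw [if_neg he]
        simp [hbeq]
    · rw [if_neg hab, ih]
      apply pvTable_congr
      intro km hkm p hp
      rw [pvKeySum_cons]
      have hbeq : ((a, b) == (km, p)) = false := by
        simp only [beq_eq_false_iff_ne, ne_eq, Prod.mk.injEq, not_and]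
        intro h1 h2
        exact hab ⟨h1 ▸ hkm, h2 ▸ hp⟩
      simp [hbeq]

-- A's +1 occurrences, summed per cell, are the occurrence count
theorem pv_keySum_ones (occs : List (String × Int)) (q0 : String × Int) :
    pvKeySum (occs.map (fun q => (q, (1 : Int)))) q0 = occs.count q0 := by
  unfold pvKeySum
  rw [List.filter_map]
  simp only [List.map_map, Function.comp_def]
  rw [List.count_eq_length_filter]
  induction occs.filter (fun q => q == q0) with
  | nil => simp
  | cons y ys ih =>
    simp only [List.map_cons, List.sum_cons, List.length_cons, ih]
    push_cast
    ring

-- the flattened occurrence list (kmer, relative_pos) both programs traverse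
def pvPairF (w k sh : Int) (s : String) : List (String × Int) :=
  (PySem.List.pyRange k (PySem.Str.len s - k + 1) 1).map
    (fun i => (PySem.Str.slice s (some i) (some (i + k)), i - w - k + sh - 1))

theorem pv_A_fold (w k sh : Int) (seqs : List String)
    (init : PySem.Dict String (PySem.Dict Int Int)) :
    seqs.foldl (fun d sequence =>
        (PySem.List.pyRange k (PySem.Str.len sequence - k + 1) 1).foldl (fun d i =>
          pvBump d (PySem.Str.slice sequence (some i) (some (i + k))) (i - w - k + sh - 1)) d) init
      = (seqs.flatMap (pvPairF w k sh)).foldl (fun d q => pvBump d q.1 q.2) init := by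
  rw [← pv_foldl_foldl_flatMap]
  congr 1
  funext d s
  rw [pvPairF, List.foldl_map]

theorem pv_A_init (kmers : List String) (positions : List Int) :
    kmers.foldl (fun d x =>
        d.insert x (positions.foldl (fun d pos => d.insert pos (0 : Int)) PySem.Dict.empty))
        PySem.Dict.empty
      = pvTable (PySem.Set.ofList kmers) (PySem.Set.ofList positions) (fun _ _ => 0) := by
  have hzc : positions.foldl (fun d pos => d.insert pos (0 : Int)) PySem.Dict.empty
      = PySem.Dict.mk ((PySem.Set.ofList positions).map (fun p => (p, 0))) :=
    PySem.Dict.ext (pv_items_foldl_insert_fn (fun _ => (0 : Int)) positions)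
  apply PySem.Dict.ext
  rw [pv_items_foldl_insert_fn]
  unfold pvTable
  simp only [hzc]

-- grouped lookup: the per-kmer dict after the grouping loop is the fold of that kmer's items
theorem pv_group_getD (L : List ((String × Int) × Int)) :
    ∀ (g : PySem.Dict String (PySem.Dict Int Int)) (km : String),
      (L.foldl (fun g e =>
          g.insert e.1.1 ((g.getD e.1.1 PySem.Dict.empty).insert e.1.2 e.2)) g).getD km PySem.Dict.empty
        = (L.filter (fun e => e.1.1 == km)).foldl (fun r e => r.insert e.1.2 e.2)
            (g.getD km PySem.Dict.empty) := by
  induction L with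
  | nil => intro g km; rfl
  | cons e L ih =>
    intro g km
    simp only [List.foldl_cons, List.filter_cons]
    by_cases h : e.1.1 = km
    · subst h
      simp only [beq_self_eq_true, if_true, List.foldl_cons, ih, PySem.Dict.getD_insert]
    · have hb : (e.1.1 == km) = false := by simp [h]
      rw [ih]
      rw [PySem.Dict.getD_insert]
      simp [Ne.symm h, hb]

-- with nodup keys, find? of a present key returns its (unique) entry
theorem pv_find?_of_mem_nodup {ν : Type} :
    ∀ (M : List (Int × ν)), (M.map Prod.fst).Nodup → ∀ (p : Int) (v : ν), (p, v) ∈ M →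
      M.find? (fun e => e.1 == p) = some (p, v) := by
  intro M
  induction M with
  | nil => intro _ p v h; cases h
  | cons e M ih =>
    intro hnd p v hm
    obtain ⟨h1, h2⟩ := List.nodup_cons.mp hnd
    rw [List.find?_cons]
    by_cases he : e.1 = p
    · have : e = (p, v) := by
        rcases List.mem_cons.mp hm with h | h
        · exact h.symm
        · exact absurd (he ▸ List.mem_map.mpr ⟨(p, v), h, rfl⟩) h1
      simp [this]
    · have hb : (e.1 == p) = false := by simp [he]
      rw [hb]
      apply ih h2 p v
      rcases List.mem_cons.mp hm with h | h
      · exact absurd (congrArg Prod.fst h.symm) he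
      · exact h

-- merging an association list with nodup keys ⊆ P over a P-row overwrites exactly those cells
theorem pv_row_merge (P : List Int) (hP : P.Nodup) :
    ∀ (M : List (Int × Int)), (M.map Prod.fst).Nodup → (∀ e ∈ M, e.1 ∈ P) → ∀ (z : Int → Int),
      M.foldl (fun r e => r.insert e.1 e.2) (PySem.Dict.mk (P.map (fun p => (p, z p))))
        = PySem.Dict.mk (P.map (fun p =>
            (p, match M.find? (fun e => e.1 == p) with | some e => e.2 | none => z p))) := by
  intro M
  induction M with
  | nil =>
    intro _ _ z
    simp only [List.foldl_nil, List.find?_nil]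
  | cons e M ih =>
    intro hnd hmem z
    obtain ⟨h1, h2⟩ := List.nodup_cons.mp hnd
    have heP : e.1 ∈ P := hmem e (List.mem_cons_self ..)
    have hcont : (PySem.Dict.mk (P.map (fun p => (p, z p)))).contains e.1 = true := by
      rw [PySem.Dict.contains_iff_mem_keys]
      simpa [PySem.Dict.keys, Function.comp_def] using heP
    have hins : (PySem.Dict.mk (P.map (fun p => (p, z p)))).insert e.1 e.2
        = PySem.Dict.mk (P.map (fun p => (p, if p = e.1 then e.2 else z p))) := by
      apply PySem.Dict.ext
      rw [PySem.Dict.items_insert_of_contains _ _ hcont]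
      simp only [List.map_map]
      apply List.map_congr_left
      intro p _
      by_cases hp : p = e.1
      · subst hp; simp
      · simp [hp]
    simp only [List.foldl_cons, hins,
      ih h2 (fun x hx => hmem x (List.mem_cons_of_mem _ hx)) (fun p => if p = e.1 then e.2 else z p)]
    congr 1
    apply List.map_congr_left
    intro p _
    rw [List.find?_cons]
    by_cases hp : e.1 = p
    · have hf : M.find? (fun x => x.1 == p) = none := by
        rw [List.find?_eq_none]
        intro x hx
        simp only [beq_eq_false_iff_ne, ne_eq, beq_iff_eq]
        intro hxe
        exact h1 (hp ▸ hxe ▸ List.mem_map.mpr ⟨x, hx, rfl⟩)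
      have hb : (e.1 == p) = true := beq_iff_eq.mpr hp
      have hp' : p = e.1 := hp.symm
      simp only [hf, hb, if_pos hp']
    · have hb : (e.1 == p) = false := by simp [hp]
      have hp' : ¬ p = e.1 := fun h => hp h.symm
      simp only [hb, if_neg hp']

theorem pv_main (seqs : List String) (k_length : Int) (window : Int) (repeats : String)
    (kmer_list : Option (List String)) :
    pos_count_kmer seqs k_length window repeats kmer_list
      = pos_count_kmer_alt seqs k_length window repeats kmer_list := by
  simp only [pos_count_kmer, pos_count_kmer_alt]
  rw [pv_A_fold, pv_A_init, pvAltKmers_eq]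
  set sh := PySem.Int.truncdiv (k_length + 1) 2 with hsh
  set pairs := seqs.flatMap (pvPairF window k_length sh) with hpairs
  set P := PySem.Set.ofList (PySem.List.pyRange (-window + sh) (window + sh + 1) 1) with hP
  have hPnd : P.Nodup := PySem.Set.nodup_ofList _
  -- A's occurrence loop is a fold of pvAdd with increment 1
  have hones : ∀ (occs : List (String × Int)) (init : PySem.Dict String (PySem.Dict Int Int)),
      occs.foldl (fun d q => pvBump d q.1 q.2) init
        = (occs.map (fun q => (q, (1 : Int)))).foldl (fun d e => pvAdd d e.1.1 e.1.2 e.2) init := by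
    intro occs init
    rw [List.foldl_map]
    rfl
  rw [hones, pvAdd_fold _ _ (PySem.Set.nodup_ofList _) hPnd]
  rw [pvTable_congr (PySem.Set.ofList (pvPossibleKmers k_length repeats kmer_list)) P
    (fun km p => 0 + pvKeySum (pairs.map (fun q => (q, (1 : Int)))) (km, p))
    (fun km p => (pairs.count (km, p) : Int))
    (by intro km _ p _; simp only [pv_keySum_ones, zero_add])]
  -- B's tally dict is a counter over the flattened occurrence list
  have hocc : (seqs.flatMap (fun seq =>
        (PySem.List.pyRange k_length (PySem.Str.len seq - k_length + 1) 1).map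
          (fun i => (PySem.Str.slice seq (some i) (some (i + k_length)),
            i - window - k_length + sh - 1)))).foldl
        (fun d key => d.insert key (d.getD key 0 + 1)) PySem.Dict.empty
      = PySem.Dict.counter pairs := by
    rw [PySem.Dict.foldl_insert_getD_add_one_eq_counter]
    rfl
  rw [hocc, PySem.Dict.items_counter]
  set S := PySem.Set.ofList pairs with hS
  have hSnd : S.Nodup := PySem.Set.nodup_ofList _
  -- B's zero row
  have hzeros : (PySem.List.pyRange (-window + sh) (window + sh + 1) 1).foldl
        (fun d p => d.insert p (0 : Int)) PySem.Dict.empty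
      = PySem.Dict.mk (P.map (fun p => (p, 0))) :=
    PySem.Dict.ext (pv_items_foldl_insert_fn (fun _ => (0 : Int)) _)
  rw [hzeros]
  -- B's row for one kmer km, evaluated
  have hrow : ∀ km : String,
      ((((S.map (fun q => (q, (pairs.count q : Int)))).foldl (fun g e =>
            g.insert e.1.1 ((g.getD e.1.1 PySem.Dict.empty).insert e.1.2 e.2))
          PySem.Dict.empty).getD km PySem.Dict.empty).items.filter
          (fun e => (PySem.Dict.mk (P.map (fun p => (p, (0 : Int))))).contains e.1)).foldl
          (fun r e => r.insert e.1 e.2) (PySem.Dict.mk (P.map (fun p => (p, 0))))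
        = PySem.Dict.mk (P.map (fun p => (p, (pairs.count (km, p) : Int)))) := by
    intro km
    rw [pv_group_getD]
    have hfilt : (S.map (fun q => (q, (pairs.count q : Int)))).filter (fun e => e.1.1 == km)
        = (S.filter (fun q => q.1 == km)).map (fun q => (q, (pairs.count q : Int))) := by
      rw [List.filter_map]
      rfl
    rw [hfilt, List.foldl_map, PySem.Dict.getD_empty]
    set Sk := S.filter (fun q => q.1 == km) with hSk
    have hSknd : Sk.Nodup := List.Nodup.filter _ hSnd
    have hfst : ∀ q ∈ Sk, q.1 = km := by
      intro q hq
      have := (List.mem_filter.mp hq).2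
      exact beq_iff_eq.mp this
    have hkeysnd : (Sk.map (fun q => q.2)).Nodup := by
      refine List.Nodup.map_on ?_ hSknd
      intro x hx y hy hxy
      have := hfst x hx; have := hfst y hy
      exact Prod.ext (by rw [hfst x hx, hfst y hy]) hxy
    have hrow0 : Sk.foldl (fun r q => r.insert q.2 (pairs.count q : Int)) PySem.Dict.empty
        = PySem.Dict.mk (Sk.map (fun q => (q.2, (pairs.count q : Int)))) := by
      apply PySem.Dict.ext
      rw [PySem.Dict.items_foldl_insert_fresh Sk (fun q => q.2)
        (fun q => (pairs.count q : Int)) PySem.Dict.empty (by intro a _; rfl) hkeysnd]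
      rfl
    rw [hrow0]
    have hitems : (PySem.Dict.mk (Sk.map (fun q => (q.2, (pairs.count q : Int))))).items
        = Sk.map (fun q => (q.2, (pairs.count q : Int))) := rfl
    rw [hitems]
    have hcontP : ∀ (x : Int), (PySem.Dict.mk (P.map (fun p => (p, (0 : Int))))).contains x
        = decide (x ∈ P) := by
      intro x
      by_cases hx : x ∈ P
      · rw [decide_eq_true hx]
        rw [PySem.Dict.contains_iff_mem_keys]
        simpa [PySem.Dict.keys, Function.comp_def] using hx
      · rw [decide_eq_false hx]
        rw [← Bool.not_eq_true, PySem.Dict.contains_iff_mem_keys]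
        simpa [PySem.Dict.keys, Function.comp_def] using hx
    have hfilt2 : (Sk.map (fun q => (q.2, (pairs.count q : Int)))).filter
          (fun e => (PySem.Dict.mk (P.map (fun p => (p, (0 : Int))))).contains e.1)
        = (Sk.filter (fun q => (PySem.Dict.mk (P.map (fun p => (p, (0 : Int))))).contains q.2)).map
            (fun q => (q.2, (pairs.count q : Int))) := by
      rw [List.filter_map]
      rfl
    rw [hfilt2, List.foldl_map]
    set Skp := Sk.filter (fun q => (PySem.Dict.mk (P.map (fun p => (p, (0 : Int))))).contains q.2) with hSkp
    have hSkpSub : ∀ q ∈ Skp, q ∈ Sk := fun q hq => (List.mem_filter.mp hq).1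
    have hSkpP : ∀ q ∈ Skp, q.2 ∈ P := by
      intro q hq
      have := (List.mem_filter.mp hq).2
      rw [hcontP] at this
      exact of_decide_eq_true this
    have hM : ∀ q ∈ Skp, ((fun q => (q.2, (pairs.count q : Int))) q).1 ∈ P := hSkpP
    have hMnd : ((Skp.map (fun q => (q.2, (pairs.count q : Int)))).map Prod.fst).Nodup := by
      rw [List.map_map]
      refine List.Nodup.map_on ?_ (List.Nodup.filter _ hSknd)
      intro x hx y hy hxy
      exact Prod.ext (by rw [hfst x (hSkpSub x hx), hfst y (hSkpSub y hy)]) hxy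
    have hfold : Skp.foldl (fun r q => r.insert q.2 (pairs.count q : Int))
          (PySem.Dict.mk (P.map (fun p => (p, 0))))
        = (Skp.map (fun q => (q.2, (pairs.count q : Int)))).foldl
            (fun r e => r.insert e.1 e.2) (PySem.Dict.mk (P.map (fun p => (p, 0)))) := by
      rw [List.foldl_map]
    rw [hfold, pv_row_merge P hPnd _ hMnd (by intro e he; obtain ⟨q, hq, rfl⟩ := List.mem_map.mp he; exact hSkpP q hq) (fun _ => 0)]
    congr 1
    apply List.map_congr_left
    intro p hp
    by_cases hin : (km, p) ∈ pairs
    · have hqS : (km, p) ∈ S := (PySem.Set.mem_ofList _ _).mpr hin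
      have hqSk : (km, p) ∈ Sk := List.mem_filter.mpr ⟨hqS, by simp⟩
      have hqSkp : (km, p) ∈ Skp := List.mem_filter.mpr ⟨hqSk, by rw [hcontP]; exact decide_eq_true hp⟩
      have hmem : ((km, p).2, (pairs.count (km, p) : Int)) ∈ Skp.map (fun q => (q.2, (pairs.count q : Int))) :=
        List.mem_map.mpr ⟨(km, p), hqSkp, rfl⟩
      rw [pv_find?_of_mem_nodup _ hMnd p _ hmem]
    · have hnone : (Skp.map (fun q => (q.2, (pairs.count q : Int)))).find? (fun e => e.1 == p) = none := by
        rw [List.find?_eq_none]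
        intro e he
        obtain ⟨q, hq, rfl⟩ := List.mem_map.mp he
        simp only [beq_eq_false_iff_ne, ne_eq, beq_iff_eq, Bool.not_eq_true]
        intro hq2
        have hq1 := hfst q (hSkpSub q hq)
        have : q = (km, p) := Prod.ext hq1 hq2
        have hqpairs : q ∈ pairs := (PySem.Set.mem_ofList _ _).mp (List.mem_filter.mp (hSkpSub q hq)).1
        exact hin (this ▸ hqpairs)
      rw [hnone]
      have : pairs.count (km, p) = 0 := List.count_eq_zero.mpr hin
      simp [this]
  -- assemble: both sides are maps over the same kmer set
  rw [PySem.Dict.ext (pv_items_foldl_insert_fn (fun km =>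
      ((((S.map (fun q => (q, (pairs.count q : Int)))).foldl (fun g e =>
            g.insert e.1.1 ((g.getD e.1.1 PySem.Dict.empty).insert e.1.2 e.2))
          PySem.Dict.empty).getD km PySem.Dict.empty).items.filter
          (fun e => (PySem.Dict.mk (P.map (fun p => (p, (0 : Int))))).contains e.1)).foldl
          (fun r e => r.insert e.1 e.2) (PySem.Dict.mk (P.map (fun p => (p, 0)))))
    (pvPossibleKmers k_length repeats kmer_list))]
  unfold pvTable
  simp only [List.map_map]
  apply List.map_congr_left
  intro km _
  simp only [Function.comp_apply, hrow km]

-- ===== VERDICT (by name: the statement is the Claim_ definition above) =====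
theorem pos_count_kmer_spec : Claim_equal_pos_count_kmer := by
  intro seqs k_length window repeats kmer_list _ _
  unfold Spec_pos_count_kmer
  exact pv_main seqs k_length window repeats kmer_list
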